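-- pv_equiv track=rewrite | github.com/MrBrantCode/unitest_baseline | mut_generate/mist_train_taco/taco_7721/solution.py | calculate_territory_difference
-- ===== SOURCE A (Python) =====
-- def calculate_territory_difference(W, H, S):
--     """
--     Calculate the absolute value of the difference between the scores of Nobuo-kun and Shizuo-kun
--     after they play the territory game on a rectangular island.
--
--     Parameters:
--     W (int): The number of columns (width) of the island.
--     H (int): The number of rows (height) of the island.
--     S (list of list of int): A 2D list representing the gains and losses for each compartment on the island.
--
--     Returns:
--     int: The absolute value of the difference between the scores of Nobuo-kun and Shizuo-kun.
--     """
--     SW = [[0] * W for _ in range(H)]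
--     SH = [[0] * W for _ in range(H)]
--
--     # Calculate SW
--     for i in range(H):
--         cnt = 0
--         for j in range(W - 1, -1, -1):
--             cnt += S[i][j]
--             SW[i][j] = cnt
--
--     # Calculate SH
--     for j in range(W):
--         cnt = 0
--         for i in range(H - 1, -1, -1):
--             cnt += S[i][j]
--             SH[i][j] = cnt
--
--     memo = {}
--
--     def dfs(x, y):
--         if (x, y) in memo:
--             return memo[x, y]
--         if x == W or y == H:
--             return 0
--         if (x + y) % 2 == 0:
--             res = max(dfs(x + 1, y) - SH[y][x], dfs(x, y + 1) + SW[y][x])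
--         else:
--             res = min(dfs(x + 1, y) - SH[y][x], dfs(x, y + 1) + SW[y][x])
--         memo[x, y] = res
--         return res
--
--     return abs(dfs(0, 0))
-- ===== SOURCE B (Python) =====
-- def calculate_territory_difference(W, H, S):
--     # Bottom-up DP column-by-column instead of memoized recursion; suffix tables
--     # built by accumulation over the truncated grid instead of index loops.
--     if W <= 0 or H <= 0:
--         return 0          # empty board: nobody scores
--     L = [row[:W] for row in S[:H]]
--
--     def suffix_sums(vals):
--         # suf[j] = sum(vals[j:]), with a trailing 0 sentinel
--         suf = [0]
--         for v in reversed(vals):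
--             suf.append(v + suf[-1])
--         suf.reverse()
--         return suf
--
--     SW = [suffix_sums(row) for row in L]   # SW[y][x] = sum of row y from column x
--     SH = [[0] * max(W, 0)]                 # SH[y][x] = sum of column x from row y
--     for row in reversed(L):
--         SH.append([a + b for a, b in zip(row, SH[-1])])
--     SH.reverse()
--
--     prev = [0] * (max(H, 0) + 1)           # dp column for x = W
--     for x in range(W - 1, -1, -1):
--         cur = [0]                          # cur[-1] = dp[x][y+1]; built for y = H-1 .. 0, then reversed
--         for y in range(H - 1, -1, -1):
--             a = prev[y] - SH[y][x]
--             b = cur[-1] + SW[y][x]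
--             cur.append(max(a, b) if (x + y) % 2 == 0 else min(a, b))
--         cur.reverse()
--         prev = cur
--     return abs(prev[0])
-- ===== Notes on version B (the rewrite author's own statement) =====
-- stated objective: alternative
-- what changed: The memoized top-down recursion over the game tree is replaced by an explicit bottom-up DP (one column of the (W+1)x(H+1) table at a time, x from W-1 down to 0), and the SW/SH suffix-sum tables are built by accumulation over the truncated grid (per-row suffix scan, and column sums by adding rows bottom-up) instead of index-addressed writes.
-- crash fix: On inputs with a negative dimension and the other dimension nonzero (W<0 and H!=0, or H<0 and W!=0) A raises (RecursionError, or IndexError on its empty suffix tables) while B returns 0. — e.g. on calculate_territory_difference(-1, -1, []): A raises RecursionError, B returns 0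
import Mathlib
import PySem

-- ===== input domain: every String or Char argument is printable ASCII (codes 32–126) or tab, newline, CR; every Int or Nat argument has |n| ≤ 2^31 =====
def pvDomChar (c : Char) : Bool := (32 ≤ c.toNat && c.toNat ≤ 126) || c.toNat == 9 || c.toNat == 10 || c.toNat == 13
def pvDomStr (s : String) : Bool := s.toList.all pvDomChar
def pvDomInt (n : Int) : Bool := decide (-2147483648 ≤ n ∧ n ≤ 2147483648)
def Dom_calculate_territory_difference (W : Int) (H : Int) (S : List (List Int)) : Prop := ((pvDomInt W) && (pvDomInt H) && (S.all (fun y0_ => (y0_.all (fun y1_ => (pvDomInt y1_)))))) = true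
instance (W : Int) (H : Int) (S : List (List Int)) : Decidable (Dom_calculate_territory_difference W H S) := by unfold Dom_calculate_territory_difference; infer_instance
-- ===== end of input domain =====

-- B replaces A's memoized top-down recursion by a bottom-up column DP and builds the
-- suffix-sum tables by accumulation over the truncated grid (objective: alternative).

-- ===== PORT A =====
-- inner loop `for j in range(n-1,-1,-1): cnt += vals[j]; arr[j] = cnt` (writes at the
-- front become conses); in-range accesses under Pre_, so vals[j] is vals.getD j 0
def swLoop (vals : List Int) : Nat → Int → List Int → List Int
  | 0, _, acc => acc
  | j+1, cnt, acc =>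
    let c := cnt + vals.getD j 0
    swLoop vals j c (c :: acc)

-- A's dfs with its memo dictionary threaded through (Python closure state).
-- `x == W` / `y == H` are ported as `Wn ≤ x` / `Hn ≤ y`: identical on the reachable
-- states x ≤ Wn, y ≤ Hn of the Pre_ inputs (0 ≤ W, 0 ≤ H), and makes dfs total.
def dfsM (Wn Hn : Nat) (SW SH : List (List Int)) (x y : Nat)
    (memo : PySem.Dict (Nat × Nat) Int) : Int × PySem.Dict (Nat × Nat) Int :=
  match memo.get? (x, y) with
  | some v => (v, memo)
  | none =>
    if h : Wn ≤ x ∨ Hn ≤ y then (0, memo)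
    else
      let p1 := dfsM Wn Hn SW SH (x+1) y memo
      let p2 := dfsM Wn Hn SW SH x (y+1) p1.2
      let a := p1.1 - ((SH.getD y []).getD x 0)
      let b := p2.1 + ((SW.getD y []).getD x 0)
      let res := if (x + y) % 2 = 0 then max a b else min a b
      (res, p2.2.insert (x, y) res)
termination_by (Wn - x) + (Hn - y)
decreasing_by all_goals omega

-- range(H) / range(W) loop bounds become .toNat (range of a negative bound is empty)
def calculate_territory_difference (W : Int) (H : Int) (S : List (List Int)) : Int :=
  let Wn := W.toNat
  let Hn := H.toNat
  let SW := (List.range Hn).map (fun i => swLoop (S.getD i []) Wn 0 [])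
  let cols := (List.range Wn).map (fun j =>
    swLoop ((List.range Hn).map (fun i => (S.getD i []).getD j 0)) Hn 0 [])
  let SH := (List.range Hn).map (fun i => (List.range Wn).map (fun j => (cols.getD j []).getD i 0))
  |(dfsM Wn Hn SW SH 0 0 PySem.Dict.empty).1|

-- ===== PORT B =====
-- suffix_sums: append over reversed + final reverse ≡ foldr with cons (same list)
def sufz (vals : List Int) : List Int :=
  vals.foldr (fun v suf => (v + suf.headD 0) :: suf) [0]

-- the SH loop: append over reversed(L) + final reverse ≡ foldr with cons
def shB (Wn : Nat) (L : List (List Int)) : List (List Int) :=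
  L.foldr (fun row acc => (List.zipWith (· + ·) row (acc.headD [])) :: acc) [List.replicate Wn 0]

-- inner y-loop: cur built for y = H-1 .. 0 (append to reversed list + final reverse ≡ cons)
def dpCol (SW SH : List (List Int)) (x : Nat) (prev : List Int) : Nat → List Int → List Int
  | 0, acc => acc
  | y+1, acc =>
    let a := prev.getD y 0 - ((SH.getD y []).getD x 0)
    let b := acc.headD 0 + ((SW.getD y []).getD x 0)
    dpCol SW SH x prev y ((if (x + y) % 2 = 0 then max a b else min a b) :: acc)

-- outer x-loop: after k iterations the column for x = Wn - k
def dpRows (SW SH : List (List Int)) (Wn Hn : Nat) : Nat → List Int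
  | 0 => List.replicate (Hn+1) 0
  | k+1 => dpCol SW SH (Wn - (k+1)) (dpRows SW SH Wn Hn k) Hn [0]

-- slices S[:H], row[:W] are ported as take .toNat: for negative W/H the Python slice
-- differs but the truncated tables are then never read and the result is |0| either way
def calculate_territory_difference_alt (W : Int) (H : Int) (S : List (List Int)) : Int :=
  if W ≤ 0 ∨ H ≤ 0 then 0  -- empty board: nobody scores
  else
  let Wn := W.toNat
  let Hn := H.toNat
  let L := (S.take Hn).map (fun row => row.take Wn)
  let SW := L.map sufz
  let SH := shB Wn L
  |(dpRows SW SH Wn Hn Wn).getD 0 0|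

-- ===== PRECONDITION & SPEC =====
-- Exactly the inputs on which the Python A returns normally: if W = 0 or H = 0 the game
-- is decided immediately (any S); otherwise both must be positive and S must really be
-- an H×(≥W) grid, else A raises IndexError/RecursionError.
def Pre_calculate_territory_difference (W : Int) (H : Int) (S : List (List Int)) : Prop :=
  W = 0 ∨ H = 0 ∨ (0 < W ∧ 0 < H ∧ H.toNat ≤ S.length ∧ ∀ row ∈ S.take H.toNat, W.toNat ≤ row.length)
instance (W : Int) (H : Int) (S : List (List Int)) : Decidable (Pre_calculate_territory_difference W H S) := by
  unfold Pre_calculate_territory_difference; infer_instance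

def pvWitness_calculate_territory_difference : Int × Int × List (List Int) := (2, 2, [[1, 2], [3, 4]])

-- On grids with a negative dimension and the other dimension nonzero, A raises
-- (RecursionError, or IndexError on its empty suffix tables) while B returns 0.
def Raises_calculate_territory_difference (W : Int) (H : Int) (S : List (List Int)) : Prop :=
  (W < 0 ∧ H ≠ 0) ∨ (H < 0 ∧ W ≠ 0)
instance (W : Int) (H : Int) (S : List (List Int)) : Decidable (Raises_calculate_territory_difference W H S) := by
  unfold Raises_calculate_territory_difference; infer_instance
def pvRaiseWitness_calculate_territory_difference : Int × Int × List (List Int) := (-1, -1, [])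
def pvRaiseWitnessOut_calculate_territory_difference : Int := 0

def Spec_calculate_territory_difference (W : Int) (H : Int) (S : List (List Int)) (out : Int) : Prop := out = calculate_territory_difference_alt W H S
instance (W : Int) (H : Int) (S : List (List Int)) (out : Int) : Decidable (Spec_calculate_territory_difference W H S out) := by unfold Spec_calculate_territory_difference; infer_instance

-- ===== CLAIM (what is proved, stated in full; the proofs are below) =====
def Claim_equal_calculate_territory_difference : Prop := ∀ (W : Int) (H : Int) (S : List (List Int)), Dom_calculate_territory_difference W H S → Pre_calculate_territory_difference W H S → Spec_calculate_territory_difference W H S (calculate_territory_difference W H S)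

def Claim_raises_calculate_territory_difference : Prop := (∀ (W : Int) (H : Int) (S : List (List Int)), Dom_calculate_territory_difference W H S → Raises_calculate_territory_difference W H S → ¬ Pre_calculate_territory_difference W H S) ∧ (Dom_calculate_territory_difference (pvRaiseWitness_calculate_territory_difference.1) (pvRaiseWitness_calculate_territory_difference.2.1) (pvRaiseWitness_calculate_territory_difference.2.2) ∧ Raises_calculate_territory_difference (pvRaiseWitness_calculate_territory_difference.1) (pvRaiseWitness_calculate_territory_difference.2.1) (pvRaiseWitness_calculate_territory_difference.2.2) ∧ calculate_territory_difference_alt (pvRaiseWitness_calculate_territory_difference.1) (pvRaiseWitness_calculate_territory_difference.2.1) (pvRaiseWitness_calculate_territory_difference.2.2) = pvRaiseWitnessOut_calculate_territory_difference)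

-- ===== LEMMAS AND PROOFS =====

-- A's dfs without the memo (its mathematical value); proof-side helper only.
def dfsA (Wn Hn : Nat) (SW SH : List (List Int)) (x y : Nat) : Int :=
  if h : Wn ≤ x ∨ Hn ≤ y then 0
  else
    let a := dfsA Wn Hn SW SH (x+1) y - ((SH.getD y []).getD x 0)
    let b := dfsA Wn Hn SW SH x (y+1) + ((SW.getD y []).getD x 0)
    if (x + y) % 2 = 0 then max a b else min a b
termination_by (Wn - x) + (Hn - y)
decreasing_by all_goals omega

theorem dfsM_spec (Wn Hn : Nat) (SW SH : List (List Int)) :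
    ∀ (x y : Nat) (memo : PySem.Dict (Nat × Nat) Int),
      (∀ p v, memo.get? p = some v → v = dfsA Wn Hn SW SH p.1 p.2) →
      (dfsM Wn Hn SW SH x y memo).1 = dfsA Wn Hn SW SH x y ∧
      (∀ p v, (dfsM Wn Hn SW SH x y memo).2.get? p = some v → v = dfsA Wn Hn SW SH p.1 p.2) := by
  intro x y memo
  fun_induction dfsM Wn Hn SW SH x y memo with
  | case1 x y memo v hv =>
    intro hmemo
    refine ⟨?_, hmemo⟩
    exact (hmemo (x, y) v hv).symm ▸ rfl
  | case2 x y memo hnone h =>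
    intro hmemo
    refine ⟨?_, hmemo⟩
    rw [dfsA, dif_pos h]
  | case3 x y memo hnone hg p1 p2 va vb res ihr ihd =>
    intro hmemo
    obtain ⟨e1, m1ok⟩ := ihr hmemo
    obtain ⟨e2, m2ok⟩ := ihd m1ok
    have hres : res = dfsA Wn Hn SW SH x y := by
      show (if (x + y) % 2 = 0
          then max ((dfsM Wn Hn SW SH (x+1) y memo).1 - ((SH.getD y []).getD x 0))
                   ((dfsM Wn Hn SW SH x (y+1) (dfsM Wn Hn SW SH (x+1) y memo).2).1 + ((SW.getD y []).getD x 0))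
          else min ((dfsM Wn Hn SW SH (x+1) y memo).1 - ((SH.getD y []).getD x 0))
                   ((dfsM Wn Hn SW SH x (y+1) (dfsM Wn Hn SW SH (x+1) y memo).2).1 + ((SW.getD y []).getD x 0)))
          = dfsA Wn Hn SW SH x y
      rw [e1, e2]
      conv_rhs => rw [dfsA, dif_neg hg]
    refine ⟨hres, ?_⟩
    intro p v hv
    simp only at hv
    rw [PySem.Dict.get?_insert] at hv
    by_cases hp : p = (x, y)
    · subst hp
      rw [if_pos rfl] at hv
      cases hv
      exact hres.symm ▸ rfl
    · rw [if_neg hp] at hv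
      exact m2ok p v hv

theorem drop_sum_take_succ (vals : List Int) (n j : Nat) (hj : j ≤ n) :
    ((vals.take (n+1)).drop j).sum = ((vals.take n).drop j).sum + vals.getD n 0 := by
  by_cases hn : n < vals.length
  · have ht : vals.take (n+1) = vals.take n ++ [vals.getD n 0] := by
      rw [List.take_add_one]
      congr 1
      rw [List.getElem?_eq_getElem hn]
      simp [List.getD_eq_getElem?_getD, List.getElem?_eq_getElem hn]
    rw [ht, List.drop_append_of_le_length (by simp; omega), List.sum_append]
    simp
  · have h1 : vals.take (n+1) = vals.take n := by
      rw [List.take_of_length_le (by omega), List.take_of_length_le (by omega)]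
    have h2 : vals.getD n 0 = 0 := by
      simp [List.getD_eq_getElem?_getD, List.getElem?_eq_none (by omega : vals.length ≤ n)]
    rw [h1, h2, add_zero]

theorem swLoop_eq (vals : List Int) :
    ∀ (n : Nat) (cnt : Int) (acc : List Int),
      swLoop vals n cnt acc
        = ((List.range n).map (fun j => cnt + ((vals.take n).drop j).sum)) ++ acc := by
  intro n
  induction n with
  | zero => intro cnt acc; simp [swLoop]
  | succ n ih =>
    intro cnt acc
    rw [swLoop]
    show swLoop vals n (cnt + vals.getD n 0) ((cnt + vals.getD n 0) :: acc) = _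
    rw [ih, List.range_succ, List.map_append]
    have hmap : (List.range n).map (fun j => cnt + vals.getD n 0 + ((vals.take n).drop j).sum)
        = (List.range n).map (fun j => cnt + ((vals.take (n+1)).drop j).sum) := by
      apply List.map_congr_left
      intro j hj
      rw [drop_sum_take_succ vals n j (le_of_lt (List.mem_range.mp hj))]
      ring
    rw [hmap]
    have hsum : ((vals.take (n+1)).drop n).sum = vals.getD n 0 := by
      rw [drop_sum_take_succ vals n n le_rfl, List.drop_eq_nil_of_le (by simp)]
      simp
    simp [hsum]

theorem swLoop_getD (vals : List Int) (n x : Nat) (hx : x < n) :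
    (swLoop vals n 0 []).getD x 0 = ((vals.take n).drop x).sum := by
  rw [swLoop_eq]
  simp [List.getD_eq_getElem?_getD, List.getElem?_map, List.getElem?_range hx]

theorem headD_eq_getD_zero {α : Type} (l : List α) (d : α) : l.headD d = l.getD 0 d := by
  cases l <;> rfl

theorem sufz_getD (l : List Int) : ∀ (j : Nat), (sufz l).getD j 0 = (l.drop j).sum := by
  induction l with
  | nil => intro j; cases j <;> simp [sufz]
  | cons a t ih =>
    intro j
    have hs : sufz (a :: t) = (a + (sufz t).headD 0) :: sufz t := rfl
    cases j with
    | zero =>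
      rw [hs]
      simp only [List.getD_cons_zero, List.drop_zero, List.sum_cons]
      rw [headD_eq_getD_zero, ih 0]
      simp
    | succ j => rw [hs]; simp only [List.getD_cons_succ]; simpa using ih j

theorem shB_head_len (Wn : Nat) (L : List (List Int)) (hL : ∀ r ∈ L, r.length = Wn) :
    ((shB Wn L).headD []).length = Wn := by
  induction L with
  | nil => simp [shB]
  | cons r t ih =>
    have hs : shB Wn (r :: t) = (List.zipWith (· + ·) r ((shB Wn t).headD [])) :: shB Wn t := rfl
    rw [hs]
    simp only [List.headD_cons, List.length_zipWith]
    rw [hL r (by simp), ih (fun x hx => hL x (by simp [hx]))]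
    simp

theorem shB_getD (Wn : Nat) (L : List (List Int)) (hL : ∀ r ∈ L, r.length = Wn) :
    ∀ (i j : Nat), j < Wn →
      ((shB Wn L).getD i []).getD j 0 = ((L.drop i).map (fun r => r.getD j 0)).sum := by
  induction L with
  | nil =>
    intro i j hj
    cases i with
    | zero => simp [shB, List.getD_eq_getElem?_getD, hj]
    | succ i => simp [shB, List.getD_eq_getElem?_getD]
  | cons r t ih =>
    intro i j hj
    have hs : shB Wn (r :: t) = (List.zipWith (· + ·) r ((shB Wn t).headD [])) :: shB Wn t := rfl
    have hLt : ∀ x ∈ t, x.length = Wn := fun x hx => hL x (by simp [hx])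
    cases i with
    | zero =>
      rw [hs]
      simp only [List.getD_cons_zero, List.drop_zero, List.map_cons, List.sum_cons]
      have hjr : j < r.length := by rw [hL r (by simp)]; exact hj
      have hjh : j < ((shB Wn t).headD []).length := by rw [shB_head_len Wn t hLt]; exact hj
      rw [List.getD_eq_getElem?_getD, List.getElem?_zipWith]
      rw [List.getElem?_eq_getElem hjr, List.getElem?_eq_getElem hjh]
      simp only [Option.getD_some]
      have h1 : r[j] = r.getD j 0 := by simp [List.getD_eq_getElem?_getD, List.getElem?_eq_getElem hjr]
      have h2 : ((shB Wn t).headD [])[j] = ((shB Wn t).getD 0 []).getD j 0 := by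
        rw [← headD_eq_getD_zero, List.getD_eq_getElem?_getD, List.getElem?_eq_getElem hjh]
        rfl
      rw [h1, h2, ih hLt 0 j hj]
      simp
    | succ i =>
      rw [hs]
      simp only [List.getD_cons_succ, List.drop_succ_cons]
      exact ih hLt i j hj

theorem map_range'_getD (f : Nat → Int) (n y : Nat) (hy : y < n) :
    (((List.range' 0 n).map f).getD y 0) = f y := by
  simp [List.getD_eq_getElem?_getD, List.getElem?_map, List.getElem?_range' hy]

theorem dpCol_spec (SWa SHa SWb SHb : List (List Int)) (Wn Hn : Nat) (x : Nat) (hx : x < Wn)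
    (prev : List Int)
    (hprev : ∀ y, y ≤ Hn → prev.getD y 0 = dfsA Wn Hn SWa SHa (x+1) y)
    (heq : ∀ x' y', x' < Wn → y' < Hn →
      ((SHb.getD y' []).getD x' 0 = (SHa.getD y' []).getD x' 0) ∧
      ((SWb.getD y' []).getD x' 0 = (SWa.getD y' []).getD x' 0)) :
    ∀ m, m ≤ Hn →
      dpCol SWb SHb x prev m ((List.range' m (Hn+1-m)).map (fun y => dfsA Wn Hn SWa SHa x y))
        = (List.range' 0 (Hn+1)).map (fun y => dfsA Wn Hn SWa SHa x y) := by
  intro m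
  induction m with
  | zero => intro _; rw [dpCol]; norm_num
  | succ m ih =>
    intro hm
    rw [dpCol]
    have hacc : (List.range' (m+1) (Hn+1-(m+1))).map (fun y => dfsA Wn Hn SWa SHa x y)
        = dfsA Wn Hn SWa SHa x (m+1) :: (List.range' (m+2) (Hn-m-1)).map (fun y => dfsA Wn Hn SWa SHa x y) := by
      have h1 : Hn + 1 - (m+1) = (Hn - m - 1) + 1 := by omega
      rw [h1, List.range'_succ, List.map_cons]
    have hhead : ((List.range' (m+1) (Hn+1-(m+1))).map (fun y => dfsA Wn Hn SWa SHa x y)).headD 0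
        = dfsA Wn Hn SWa SHa x (m+1) := by rw [hacc]; rfl
    have hv : (if (x + m) % 2 = 0
          then max (prev.getD m 0 - ((SHb.getD m []).getD x 0)) ((((List.range' (m+1) (Hn+1-(m+1))).map (fun y => dfsA Wn Hn SWa SHa x y)).headD 0) + ((SWb.getD m []).getD x 0))
          else min (prev.getD m 0 - ((SHb.getD m []).getD x 0)) ((((List.range' (m+1) (Hn+1-(m+1))).map (fun y => dfsA Wn Hn SWa SHa x y)).headD 0) + ((SWb.getD m []).getD x 0)))
        = dfsA Wn Hn SWa SHa x m := by
      obtain ⟨e1, e2⟩ := heq x m hx (by omega)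
      rw [hhead, hprev m (by omega), e1, e2]
      conv_rhs => rw [dfsA]
      rw [dif_neg (by omega)]
    rw [hv]
    have hcons : dfsA Wn Hn SWa SHa x m :: (List.range' (m+1) (Hn+1-(m+1))).map (fun y => dfsA Wn Hn SWa SHa x y)
        = (List.range' m (Hn+1-m)).map (fun y => dfsA Wn Hn SWa SHa x y) := by
      have h1 : Hn + 1 - m = (Hn + 1 - (m+1)) + 1 := by omega
      rw [h1, List.range'_succ, List.map_cons]
    rw [hcons]
    exact ih (by omega)

theorem dpRows_spec (SWa SHa SWb SHb : List (List Int)) (Wn Hn : Nat)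
    (heq : ∀ x' y', x' < Wn → y' < Hn →
      ((SHb.getD y' []).getD x' 0 = (SHa.getD y' []).getD x' 0) ∧
      ((SWb.getD y' []).getD x' 0 = (SWa.getD y' []).getD x' 0)) :
    ∀ k, k ≤ Wn →
      dpRows SWb SHb Wn Hn k = (List.range' 0 (Hn+1)).map (fun y => dfsA Wn Hn SWa SHa (Wn - k) y) := by
  intro k
  induction k with
  | zero =>
    intro _
    rw [dpRows]
    symm
    rw [List.eq_replicate_iff]
    refine ⟨by simp, ?_⟩
    intro b hb
    obtain ⟨y, hy, rfl⟩ := List.mem_map.mp hb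
    rw [dfsA, dif_pos (Or.inl (by omega))]
  | succ k ih =>
    intro hk
    rw [dpRows]
    have hx : Wn - (k+1) < Wn := by omega
    have hstep : Wn - (k+1) + 1 = Wn - k := by omega
    have hprev : ∀ y, y ≤ Hn → (dpRows SWb SHb Wn Hn k).getD y 0 = dfsA Wn Hn SWa SHa (Wn - (k+1) + 1) y := by
      intro y hy
      rw [ih (by omega), hstep, map_range'_getD _ _ _ (by omega)]
    have hinit : ([0] : List Int) = (List.range' Hn (Hn+1-Hn)).map (fun y => dfsA Wn Hn SWa SHa (Wn - (k+1)) y) := by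
      have h1 : Hn + 1 - Hn = 1 := by omega
      rw [h1]
      simp only [List.range'_one, List.map_cons, List.map_nil]
      rw [dfsA, dif_pos (Or.inr (by omega))]
    rw [hinit]
    exact dpCol_spec SWa SHa SWb SHb Wn Hn _ hx _ hprev heq Hn le_rfl

theorem sw_eq (S : List (List Int)) (Wn Hn x y : Nat) (hx : x < Wn) (hy : y < Hn)
    (hlen : Hn ≤ S.length) :
    ((((S.take Hn).map (fun row => row.take Wn)).map sufz).getD y []).getD x 0
      = (((List.range Hn).map (fun i => swLoop (S.getD i []) Wn 0 [])).getD y []).getD x 0 := by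
  have hyS : y < S.length := by omega
  have hgd : S.getD y [] = S[y] := by
    simp [List.getD_eq_getElem?_getD, List.getElem?_eq_getElem hyS]
  have hL : (((S.take Hn).map (fun row => row.take Wn)).map sufz).getD y [] = sufz (S[y].take Wn) := by
    rw [List.map_map, List.getD_eq_getElem?_getD, List.getElem?_map,
        List.getElem?_take, if_pos hy, List.getElem?_eq_getElem hyS]
    rfl
  have hR : ((List.range Hn).map (fun i => swLoop (S.getD i []) Wn 0 [])).getD y []
      = swLoop (S.getD y []) Wn 0 [] := by
    rw [List.getD_eq_getElem?_getD, List.getElem?_map, List.getElem?_range hy]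
    rfl
  rw [hL, hR, hgd, sufz_getD, swLoop_getD _ _ _ hx]

theorem map_range_getD {α : Type} (f : Nat → α) (d : α) (n y : Nat) (hy : y < n) :
    ((List.range n).map f).getD y d = f y := by
  rw [List.getD_eq_getElem?_getD, List.getElem?_map, List.getElem?_range hy]; rfl

theorem sh_eq (S : List (List Int)) (Wn Hn x y : Nat) (hx : x < Wn) (hy : y < Hn)
    (hlen : Hn ≤ S.length) (hshape : ∀ row ∈ S.take Hn, Wn ≤ row.length) :
    ((shB Wn ((S.take Hn).map (fun row => row.take Wn))).getD y []).getD x 0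
      = (((List.range Hn).map (fun i => (List.range Wn).map (fun j =>
          ((((List.range Wn).map (fun j => swLoop ((List.range Hn).map (fun i =>
            (S.getD i []).getD j 0)) Hn 0 [])).getD j []).getD i 0)))).getD y []).getD x 0 := by
  set L : List (List Int) := (S.take Hn).map (fun row => row.take Wn) with hLdef
  have hLlen : ∀ r ∈ L, r.length = Wn := by
    intro r hr
    obtain ⟨row, hrow, rfl⟩ := List.mem_map.mp hr
    simp only [List.length_take]
    exact Nat.min_eq_left (hshape row hrow)
  -- right side: reduce to the suffix sum of column x
  have hR1 : (((List.range Hn).map (fun i => (List.range Wn).map (fun j =>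
          ((((List.range Wn).map (fun j => swLoop ((List.range Hn).map (fun i =>
            (S.getD i []).getD j 0)) Hn 0 [])).getD j []).getD i 0)))).getD y [])
      = (List.range Wn).map (fun j =>
          ((((List.range Wn).map (fun j => swLoop ((List.range Hn).map (fun i =>
            (S.getD i []).getD j 0)) Hn 0 [])).getD j []).getD y 0)) := by
    exact map_range_getD _ _ _ _ hy
  have hR2 : ((List.range Wn).map (fun j => swLoop ((List.range Hn).map (fun i =>
            (S.getD i []).getD j 0)) Hn 0 [])).getD x []
      = swLoop ((List.range Hn).map (fun i => (S.getD i []).getD x 0)) Hn 0 [] := by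
    exact map_range_getD _ _ _ _ hx
  rw [hR1, map_range_getD _ _ _ _ hx, hR2, swLoop_getD _ _ _ hy]
  -- the column list equals L.map (getD x)
  have hcol : (List.range Hn).map (fun i => (S.getD i []).getD x 0)
      = L.map (fun r => r.getD x 0) := by
    apply List.ext_getElem?
    intro i
    by_cases hi : i < Hn
    · have hiS : i < S.length := by omega
      have h3 : S.getD i [] = S[i] := by
        simp [List.getD_eq_getElem?_getD, List.getElem?_eq_getElem hiS]
      rw [List.getElem?_map, List.getElem?_range hi, hLdef, List.getElem?_map,
          List.getElem?_map, List.getElem?_take, if_pos hi, List.getElem?_eq_getElem hiS]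
      simp only [Option.map_some, Option.some.injEq]
      rw [h3, List.getD_eq_getElem?_getD, List.getD_eq_getElem?_getD,
          List.getElem?_take, if_pos hx]
    · rw [List.getElem?_eq_none (by simp; omega), List.getElem?_eq_none (by simp [hLdef]; omega)]
  rw [hcol]
  have htake : (L.map (fun r => r.getD x 0)).take Hn = L.map (fun r => r.getD x 0) := by
    apply List.take_of_length_le
    simp [hLdef]
  rw [htake]
  have hdrop : (L.map (fun r => r.getD x 0)).drop y = (L.drop y).map (fun r => r.getD x 0) := by
    simp
  rw [hdrop, shB_getD Wn L hLlen y x hx]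

theorem core_eq (Wn Hn : Nat) (SWa SHa SWb SHb : List (List Int))
    (heq : ∀ x' y', x' < Wn → y' < Hn →
      ((SHb.getD y' []).getD x' 0 = (SHa.getD y' []).getD x' 0) ∧
      ((SWb.getD y' []).getD x' 0 = (SWa.getD y' []).getD x' 0)) :
    (dfsM Wn Hn SWa SHa 0 0 PySem.Dict.empty).1 = (dpRows SWb SHb Wn Hn Wn).getD 0 0 := by
  rw [(dfsM_spec Wn Hn SWa SHa 0 0 _ (fun p v h => by
    rw [PySem.Dict.get?_empty] at h; cases h)).1]
  rw [dpRows_spec SWa SHa SWb SHb Wn Hn heq Wn le_rfl]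
  rw [map_range'_getD _ _ 0 (by omega), Nat.sub_self]

-- ===== VERDICT (by name: the statement is the Claim_ definition above) =====
theorem calculate_territory_difference_spec : Claim_equal_calculate_territory_difference := by
  intro W H S hdom hpre
  unfold Spec_calculate_territory_difference
  unfold calculate_territory_difference calculate_territory_difference_alt
  simp only
  by_cases hdeg : W ≤ 0 ∨ H ≤ 0
  · rw [if_pos hdeg]
    rw [(dfsM_spec W.toNat H.toNat _ _ 0 0 _ (fun p v h => by
      rw [PySem.Dict.get?_empty] at h; cases h)).1]
    rw [dfsA, dif_pos (show W.toNat ≤ 0 ∨ H.toNat ≤ 0 by omega)]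
    rfl
  · rw [if_neg hdeg]
    rcases hpre with h | h | ⟨h1, h2, h3, h4⟩
    · omega
    · omega
    have heq : ∀ x' y', x' < W.toNat → y' < H.toNat →
        (((shB W.toNat ((S.take H.toNat).map (fun row => row.take W.toNat))).getD y' []).getD x' 0
          = (((List.range H.toNat).map (fun i => (List.range W.toNat).map (fun j =>
              ((((List.range W.toNat).map (fun j => swLoop ((List.range H.toNat).map (fun i =>
                (S.getD i []).getD j 0)) H.toNat 0 [])).getD j []).getD i 0)))).getD y' []).getD x' 0) ∧
        (((((S.take H.toNat).map (fun row => row.take W.toNat)).map sufz).getD y' []).getD x' 0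
          = (((List.range H.toNat).map (fun i => swLoop (S.getD i []) W.toNat 0 [])).getD y' []).getD x' 0) :=
      fun x' y' hx hy =>
        ⟨sh_eq S W.toNat H.toNat x' y' hx hy h3 h4, sw_eq S W.toNat H.toNat x' y' hx hy h3⟩
    have := core_eq W.toNat H.toNat
      ((List.range H.toNat).map (fun i => swLoop (S.getD i []) W.toNat 0 []))
      ((List.range H.toNat).map (fun i => (List.range W.toNat).map (fun j =>
        ((((List.range W.toNat).map (fun j => swLoop ((List.range H.toNat).map (fun i =>
          (S.getD i []).getD j 0)) H.toNat 0 [])).getD j []).getD i 0))))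
      (((S.take H.toNat).map (fun row => row.take W.toNat)).map sufz)
      (shB W.toNat ((S.take H.toNat).map (fun row => row.take W.toNat)))
      heq
    rw [this]

theorem calculate_territory_difference_raises : Claim_raises_calculate_territory_difference := by
  unfold Claim_raises_calculate_territory_difference
  constructor
  · intro W H S _ hr hp
    unfold Raises_calculate_territory_difference at hr
    unfold Pre_calculate_territory_difference at hp
    rcases hp with h | h | ⟨h1, h2, _⟩ <;> rcases hr with ⟨a, b⟩ | ⟨a, b⟩ <;> omega
  · exact ⟨by decide, by decide, by decide⟩

-- self-check: B's port really returns the stated value at the raise witness (read off the theorem above)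
theorem calculate_territory_difference_raises_witness :
    calculate_territory_difference_alt (-1) (-1) [] = pvRaiseWitnessOut_calculate_territory_difference :=
  calculate_territory_difference_raises.2.2.2
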